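-- pv_equiv track=rewrite | github.com/jjerry-k/leetcode | 1417.reformat-the-string.py | reformat
-- ===== SOURCE A (Python) =====
-- def reformat(s: str) -> str:
--     digit, char = [], []
--     for elem in s:
--         if elem.isdigit(): digit.append(elem)
--         else: char.append(elem)
--
--     if abs(len(digit)-len(char)) > 1 : return ""
--
--     if len(digit) > len(char): return digit[0] + "".join([f"{c}{d}" for d, c in zip(digit[1:], char)])
--     elif len(char) > len(digit): return char[0] + "".join([f"{d}{c}" for c, d in zip(char[1:], digit)])
--     else: return "".join([f"{d}{c}" for c, d in zip(char, digit)])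
-- ===== SOURCE B (Python) =====
-- def reformat(s: str) -> str:
--     digit, char = [], []
--     for c in s:
--         (digit if c.isdigit() else char).append(c)
--     if abs(len(digit) - len(char)) > 1:
--         return ""
--     first, second = (digit, char) if len(char) <= len(digit) else (char, digit)
--
--     def weave(f, s):
--         if not f:
--             return []
--         return [f[0]] + s[:1] + weave(f[1:], s[1:])
--
--     return "".join(weave(first, second))
-- ===== Notes on version B (the rewrite author's own statement) =====
-- stated objective: simpler
-- what changed: Replaces A's three interleave branches (slice+zip with f-string pairs in two mirrored orders plus a separate equal case) by a single choice of (first, second) with the longer list (digit on ties) first and one recursive weave that interleaves them.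
import Mathlib
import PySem

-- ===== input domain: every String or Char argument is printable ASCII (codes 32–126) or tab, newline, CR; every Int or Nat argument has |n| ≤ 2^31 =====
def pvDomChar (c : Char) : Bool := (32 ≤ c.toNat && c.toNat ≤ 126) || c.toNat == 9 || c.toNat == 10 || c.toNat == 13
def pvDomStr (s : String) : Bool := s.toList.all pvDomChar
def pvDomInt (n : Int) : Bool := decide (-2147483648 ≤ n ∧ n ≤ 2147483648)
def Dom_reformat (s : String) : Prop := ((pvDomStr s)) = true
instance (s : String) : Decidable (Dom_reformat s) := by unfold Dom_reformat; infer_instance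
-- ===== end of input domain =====

-- B replaces A's three interleave branches by one (first, second) choice and a single recursive weave; objective: simpler.

-- ===== PORT A =====
def reformat (s : String) : String :=
  let dc := s.toList.foldl
    (fun (p : List Char × List Char) elem =>
      if PySem.Chars.isdigit elem then (p.1 ++ [elem], p.2) else (p.1, p.2 ++ [elem]))
    ([], [])
  let digit := dc.1
  let char := dc.2
  if ((digit.length : Int) - (char.length : Int)).natAbs > 1 then "" else
  if digit.length > char.length then
    String.ofList ((PySem.List.pyGet? digit 0).toList ++
      ((digit.drop 1).zip char).flatMap (fun p => [p.2, p.1]))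
  else if char.length > digit.length then
    String.ofList ((PySem.List.pyGet? char 0).toList ++
      ((char.drop 1).zip digit).flatMap (fun p => [p.2, p.1]))
  else
    String.ofList ((char.zip digit).flatMap (fun p => [p.2, p.1]))

-- ===== PORT B =====
def pvWeave : List Char → List Char → List Char
  | [], _ => []
  | f :: fs, s => f :: (s.take 1 ++ pvWeave fs (s.drop 1))

def reformat_alt (s : String) : String :=
  let digit := s.toList.filter (fun c => PySem.Chars.isdigit c)
  let char := s.toList.filter (fun c => !PySem.Chars.isdigit c)
  if ((digit.length : Int) - (char.length : Int)).natAbs > 1 then "" else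
  let fs := if char.length ≤ digit.length then (digit, char) else (char, digit)
  String.ofList (pvWeave fs.1 fs.2)

-- ===== PRECONDITION & SPEC =====
def Spec_reformat (s : String) (out : String) : Prop := out = reformat_alt s
instance (s : String) (out : String) : Decidable (Spec_reformat s out) := by unfold Spec_reformat; infer_instance

-- ===== CLAIM (what is proved, stated in full; the proofs are below) =====
def Claim_equal_reformat : Prop := ∀ (s : String), Dom_reformat s → Spec_reformat s (reformat s)

-- ===== LEMMAS AND PROOFS =====

-- A's foldl partition equals B's two filters.
theorem pvFoldl_partition (l : List Char) (a b : List Char) :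
    l.foldl
      (fun (p : List Char × List Char) elem =>
        if PySem.Chars.isdigit elem then (p.1 ++ [elem], p.2) else (p.1, p.2 ++ [elem]))
      (a, b)
    = (a ++ l.filter (fun c => PySem.Chars.isdigit c),
       b ++ l.filter (fun c => !PySem.Chars.isdigit c)) := by
  induction l generalizing a b with
  | nil => simp
  | cons x xs ih =>
    by_cases h : PySem.Chars.isdigit x <;> simp [h, ih]

-- weave on equal lengths is the equal-case zip interleave
theorem pvWeave_eq (f s : List Char) (h : f.length = s.length) :
    pvWeave f s = (f.zip s).flatMap (fun p => [p.1, p.2]) := by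
  induction f generalizing s with
  | nil => simp [pvWeave]
  | cons a f' ih =>
    cases s with
    | nil => simp at h
    | cons b s' =>
      show a :: ([b] ++ pvWeave f' s') = _
      rw [ih s' (by simpa using h)]
      simp [List.zip_cons_cons]

-- weave when the first list is one longer: the lead element plus swapped pairs
theorem pvWeave_succ (a : Char) (f s : List Char) (h : f.length = s.length) :
    pvWeave (a :: f) s = a :: (f.zip s).flatMap (fun p => [p.2, p.1]) := by
  induction s generalizing a f with
  | nil =>
    cases f with
    | nil => simp [pvWeave]
    | cons c f' => simp at h
  | cons b s' ih =>
    cases f with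
    | nil => simp at h
    | cons c f' =>
      show a :: ([b] ++ pvWeave (c :: f') s') = _
      rw [ih c f' (by simpa using h)]
      simp [List.zip_cons_cons]

-- swapping the two lists of a zip while swapping the pair output
theorem pvZip_swap (l m : List Char) :
    (l.zip m).flatMap (fun p => [p.2, p.1]) = (m.zip l).flatMap (fun p => [p.1, p.2]) := by
  induction l generalizing m with
  | nil => simp
  | cons a l' ih =>
    cases m with
    | nil => simp
    | cons b m' => simp only [List.zip_cons_cons, List.flatMap_cons, ih m', List.cons_append, List.nil_append]

theorem reformat_eq_alt (s : String) : reformat s = reformat_alt s := by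
  unfold reformat reformat_alt
  rw [pvFoldl_partition]
  simp only [List.nil_append]
  generalize s.toList.filter (fun c => PySem.Chars.isdigit c) = D
  generalize s.toList.filter (fun c => !PySem.Chars.isdigit c) = C
  by_cases hguard : ((D.length : Int) - (C.length : Int)).natAbs > 1
  · simp [hguard]
  · simp only [hguard, if_false]
    by_cases h1 : D.length > C.length
    · -- digit longer: exactly one more
      have hlen : D.length = C.length + 1 := by omega
      have hle : C.length ≤ D.length := by omega
      cases D with
      | nil => simp at hlen
      | cons d D' =>
        simp only [h1, if_true, hle, if_true]
        rw [pvWeave_succ d D' C (by simpa using hlen)]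
        simp [PySem.List.pyGet?, PySem.List.pyIdx?]
    · by_cases h2 : C.length > D.length
      · have hlen : C.length = D.length + 1 := by omega
        have hle : ¬ C.length ≤ D.length := by omega
        cases C with
        | nil => simp at hlen
        | cons c C' =>
          simp only [h1, if_false, h2, if_true, hle, if_false]
          rw [pvWeave_succ c C' D (by simpa using hlen)]
          simp [PySem.List.pyGet?, PySem.List.pyIdx?]
      · have hlen : D.length = C.length := by omega
        have hle : C.length ≤ D.length := by omega
        simp only [h1, if_false, h2, if_false, hle, if_true]
        rw [pvWeave_eq D C hlen, pvZip_swap]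

-- ===== VERDICT (by name: the statement is the Claim_ definition above) =====
theorem reformat_spec : Claim_equal_reformat := by
  intro s _
  exact reformat_eq_alt s
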